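-- pv_equiv track=rewrite | github.com/Hhankyangg/cs61a-fa20 | project/cats/cats.py | shifty_shifts
-- ===== SOURCE A (Python) =====
-- def shifty_shifts(start, goal, limit):
--     """A diff function for autocorrect that determines how many letters
--     in START need to be substituted to create GOAL, then adds the difference in
--     their lengths.
--     """
--     # BEGIN PROBLEM 6
--     if limit < 0:
--         return 0
--     elif start == "" or goal == "":
--         return max(len(start), len(goal))
--     else:
--         if start[0] == goal[0]:
--             return shifty_shifts(start[1:], goal[1:], limit)
--         else:
--             return 1 + shifty_shifts(start[1:], goal[1:], limit-1)
-- ===== SOURCE B (Python) =====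
-- def shifty_shifts(start, goal, limit):
--     if limit < 0:
--         return 0
--     diffs = 0
--     for i in range(min(len(start), len(goal))):
--         if start[i] != goal[i]:
--             diffs += 1
--             if diffs > limit:
--                 return diffs
--     return diffs + abs(len(start) - len(goal))
-- ===== Notes on version B (the rewrite author's own statement) =====
-- stated objective: faster
-- what changed: Replaced the suffix recursion with slicing by a single iterative index loop carrying a mismatch counter with an early cutoff return; the length difference is added once via abs at the end instead of through a base-case max.
import Mathlib
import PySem

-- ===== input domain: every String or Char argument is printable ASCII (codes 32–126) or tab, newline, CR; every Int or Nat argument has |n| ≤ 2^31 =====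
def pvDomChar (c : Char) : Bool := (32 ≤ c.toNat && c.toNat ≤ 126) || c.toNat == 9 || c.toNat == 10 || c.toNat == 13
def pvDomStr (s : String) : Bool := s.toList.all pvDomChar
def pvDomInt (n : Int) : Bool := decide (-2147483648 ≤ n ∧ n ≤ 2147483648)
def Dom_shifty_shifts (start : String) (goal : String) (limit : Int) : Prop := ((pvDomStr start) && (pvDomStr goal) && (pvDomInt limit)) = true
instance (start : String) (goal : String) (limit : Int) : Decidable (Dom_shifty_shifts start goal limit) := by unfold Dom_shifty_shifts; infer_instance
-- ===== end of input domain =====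

-- B replaces A's suffix recursion by a single index loop with an early cutoff return; return values proved equal.

-- ===== PORT A =====
-- A's recursion on the two strings: empty-string check, head comparison, tail recursion.
def shiftyRecA : List Char → List Char → Int → Int
  | s, g, limit =>
    if limit < 0 then 0
    else
      match s, g with
      | [], g => (g.length : Int)          -- start == "" : max(len start, len goal) = len goal
      | s, [] => (s.length : Int)          -- goal == ""  : max = len start
      | a :: s', b :: g' =>
        if a = b then shiftyRecA s' g' limit
        else 1 + shiftyRecA s' g' (limit - 1)

def shifty_shifts (start : String) (goal : String) (limit : Int) : Int :=
  shiftyRecA start.toList goal.toList limit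

-- ===== PORT B =====
-- B's loop over the common positions, carrying the mismatch counter `diffs`;
-- `extra` is the abs length difference added when the loop completes.
def shiftyLoopB : List (Char × Char) → Int → Int → Int → Int
  | [], diffs, _, extra => diffs + extra
  | (a, b) :: rest, diffs, limit, extra =>
    if a ≠ b then
      if diffs + 1 > limit then diffs + 1     -- early return
      else shiftyLoopB rest (diffs + 1) limit extra
    else shiftyLoopB rest diffs limit extra

def shifty_shifts_alt (start : String) (goal : String) (limit : Int) : Int :=
  if limit < 0 then 0
  else
    shiftyLoopB (start.toList.zip goal.toList) 0 limit
      |((start.toList.length : Int) - (goal.toList.length : Int))|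

-- ===== PRECONDITION & SPEC =====
def Spec_shifty_shifts (start : String) (goal : String) (limit : Int) (out : Int) : Prop := out = shifty_shifts_alt start goal limit
instance (start : String) (goal : String) (limit : Int) (out : Int) : Decidable (Spec_shifty_shifts start goal limit out) := by unfold Spec_shifty_shifts; infer_instance

-- ===== CLAIM (what is proved, stated in full; the proofs are below) =====
def Claim_equal_shifty_shifts : Prop := ∀ (start : String) (goal : String) (limit : Int), Dom_shifty_shifts start goal limit → Spec_shifty_shifts start goal limit (shifty_shifts start goal limit)

-- ===== LEMMAS AND PROOFS =====

-- Unfolding equations for A's recursion, one per shape of the two strings.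
theorem recA_nil_left (g : List Char) (l : Int) :
    shiftyRecA [] g l = if l < 0 then 0 else (g.length : Int) := by cases g <;> rfl

theorem recA_nil_right (s : List Char) (l : Int) :
    shiftyRecA s [] l = if l < 0 then 0 else (s.length : Int) := by cases s <;> rfl

theorem recA_cons (a b : Char) (s g : List Char) (l : Int) :
    shiftyRecA (a :: s) (b :: g) l =
      if l < 0 then 0
      else if a = b then shiftyRecA s g l else 1 + shiftyRecA s g (l - 1) := rfl

-- A's recursion returns 0 whenever the budget is negative (the cutoff case).
theorem recA_neg (s g : List Char) (l : Int) (h : l < 0) : shiftyRecA s g l = 0 := by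
  cases s <;> cases g <;> simp [recA_nil_left, recA_nil_right, recA_cons, h]

-- Loop invariant: with diffs ≤ limit and extra the abs length difference of the
-- remaining suffixes, B's loop returns diffs + A's remaining recursion at budget limit - diffs.
theorem shiftyLoop_eq (s : List Char) : ∀ (g : List Char) (diffs limit extra : Int),
    diffs ≤ limit → extra = |((s.length : Int) - (g.length : Int))| →
    shiftyLoopB (s.zip g) diffs limit extra = diffs + shiftyRecA s g (limit - diffs) := by
  induction s with
  | nil =>
    intro g diffs limit extra hle hextra
    rw [recA_nil_left, if_neg (by omega : ¬ limit - diffs < 0)]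
    have hx : extra = (g.length : Int) := by rw [hextra]; simp
    simp [shiftyLoopB, hx]
  | cons a s' ih =>
    intro g diffs limit extra hle hextra
    cases g with
    | nil =>
      rw [recA_nil_right, if_neg (by omega : ¬ limit - diffs < 0)]
      have hx : extra = (((a :: s').length : Int)) := by rw [hextra]; simp; positivity
      simp [shiftyLoopB, hx]
    | cons b g' =>
      have hext' : extra = |((s'.length : Int) - (g'.length : Int))| := by
        rw [hextra]; congr 1; simp only [List.length_cons]; push_cast; ring
      simp only [List.zip_cons_cons, shiftyLoopB]
      rw [recA_cons, if_neg (by omega : ¬ limit - diffs < 0)]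
      by_cases hab : a = b
      · simp only [hab, ne_eq, not_true_eq_false, if_false, if_true]
        exact ih g' diffs limit extra hle hext'
      · rw [if_pos hab, if_neg hab]
        by_cases hcut : diffs + 1 > limit
        · rw [if_pos hcut, recA_neg s' g' _ (by omega : limit - diffs - 1 < 0)]
          omega
        · rw [if_neg hcut, ih g' (diffs + 1) limit extra (by omega) hext']
          have h2 : limit - (diffs + 1) = limit - diffs - 1 := by omega
          rw [h2]; ring

-- ===== VERDICT (by name: the statement is the Claim_ definition above) =====
theorem shifty_shifts_spec : Claim_equal_shifty_shifts := by
  intro start goal limit _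
  unfold Spec_shifty_shifts shifty_shifts shifty_shifts_alt
  by_cases h : limit < 0
  · rw [if_pos h, recA_neg _ _ _ h]
  · rw [if_neg h, shiftyLoop_eq _ _ 0 limit _ (by omega) rfl]
    simp
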